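-- pv_equiv track=rewrite | github.com/Kudito98/Codesignal-tasks | code-arcade/31-increaseNumberRoundness/increaseNumberRoundness.py | solution
-- ===== SOURCE A (Python) =====
-- def solution(n):
--     while n % 10 == 0:
--         n //= 10
--
--     temp = 1
--     while n:
--         temp *= n%10
--         n//=10
--
--     if temp ==0:
--         return True
--     else:
--         return False
-- ===== SOURCE B (Python) =====
-- def solution(n):
--     s = str(n).rstrip('0')
--     return '0' in s
-- ===== Notes on version B (the rewrite author's own statement) =====
-- stated objective: idiomatic
-- what changed: Replaces the two arithmetic div/mod loops and the digit-product accumulator with string operations: str(n).rstrip('0') then a '0'-membership test; Pre_ restricts to n > 0, the only inputs on which A terminates (A loops forever on n <= 0).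
-- outside the precondition, e.g. on solution(0): A does not finish within the time limit, B returns False
import Mathlib
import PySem

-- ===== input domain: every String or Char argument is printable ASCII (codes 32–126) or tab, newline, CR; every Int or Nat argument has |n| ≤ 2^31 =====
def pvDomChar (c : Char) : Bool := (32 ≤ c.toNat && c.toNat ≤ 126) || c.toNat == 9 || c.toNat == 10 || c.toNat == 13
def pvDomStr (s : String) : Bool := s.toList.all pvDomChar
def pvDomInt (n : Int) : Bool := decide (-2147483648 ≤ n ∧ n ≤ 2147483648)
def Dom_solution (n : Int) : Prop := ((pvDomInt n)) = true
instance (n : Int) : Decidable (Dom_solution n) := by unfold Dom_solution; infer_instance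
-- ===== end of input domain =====

-- B replaces A's two arithmetic div/mod loops and digit-product accumulator with
-- str(n).rstrip('0') and a '0'-membership test (idiomatic, same cost).

-- ===== PORT A =====
-- A's two while-loops; fuel only makes the recursion total (n.natAbs + 1 steps always
-- suffice on Pre_, where each iteration strictly shrinks n).
def stripA : Nat → Int → Int
  | 0, n => n
  | f + 1, n => if PySem.Int.mod n 10 = 0 then stripA f (PySem.Int.floordiv n 10) else n

def prodA : Nat → Int → Int → Int
  | 0, _, t => t
  | f + 1, n, t => if n ≠ 0 then prodA f (PySem.Int.floordiv n 10) (t * PySem.Int.mod n 10) else t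

def solution (n : Int) : Bool :=
  let m := stripA (n.natAbs + 1) n
  let t := prodA (m.natAbs + 1) m 1
  if t = 0 then true else false

-- ===== PORT B =====
-- s.rstrip('0') has no PySem primitive; ported exactly as reverse/dropWhile/reverse on
-- the character list of str(n).  '0' in s is PySem.Chars.isIn.
def solution_alt (n : Int) : Bool :=
  let s := PySem.Int.toChars n
  let t := (s.reverse.dropWhile (fun c => c == '0')).reverse
  PySem.Chars.isIn ['0'] t

-- ===== PRECONDITION & SPEC =====
-- Pre_ excludes n ≤ 0: there A's first while-loop never terminates (diverges), so A
-- returns exactly on the positive integers.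
def Pre_solution (n : Int) : Prop := 0 < n
instance (n : Int) : Decidable (Pre_solution n) := by unfold Pre_solution; infer_instance
def pvWitness_solution : Int := (102)

def Spec_solution (n : Int) (out : Bool) : Prop := out = solution_alt n
instance (n : Int) (out : Bool) : Decidable (Spec_solution n out) := by unfold Spec_solution; infer_instance

-- ===== CLAIM (what is proved, stated in full; the proofs are below) =====
def Claim_equal_solution : Prop := ∀ (n : Int), Dom_solution n → Pre_solution n → Spec_solution n (solution n)

-- ===== LEMMAS AND PROOFS =====

-- trailing-zero stripping on Nat (proof-side mirror of A's first loop)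
def natStrip (m : Nat) : Nat :=
  if h : 10 ∣ m ∧ 0 < m then natStrip (m / 10) else m
termination_by m
decreasing_by exact Nat.div_lt_self h.2 (by norm_num)

theorem stripA_eq (f m : Nat) (hm : 0 < m) (hf : m < f) :
    stripA f (m : Int) = ((natStrip m : Nat) : Int) := by
  induction f generalizing m with
  | zero => omega
  | succ f ih =>
    rw [stripA, natStrip]
    have h10 : PySem.Int.mod (m : Int) 10 = ((m % 10 : Nat) : Int) := by
      exact_mod_cast PySem.Int.mod_natCast m 10
    have hdiv : PySem.Int.floordiv (m : Int) 10 = ((m / 10 : Nat) : Int) := by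
      exact_mod_cast PySem.Int.floordiv_natCast m 10
    by_cases hd : 10 ∣ m
    · have hz : m % 10 = 0 := by omega
      have hge : 10 ≤ m := Nat.le_of_dvd hm hd
      rw [h10, hz, hdiv, dif_pos ⟨hd, hm⟩]
      norm_num
      exact ih (m / 10) (by omega) (by omega)
    · have hz : m % 10 ≠ 0 := by omega
      rw [h10, dif_neg (by exact fun h => hd h.1)]
      rw [if_neg (by exact_mod_cast hz)]

theorem prodA_zero_iff (f : Nat) : ∀ (m : Nat) (t : Int), m < f →
    (prodA f (m : Int) t = 0 ↔ t = 0 ∨ 0 ∈ Nat.digits 10 m) := by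
  induction f with
  | zero => intro m t h; omega
  | succ f ih =>
    intro m t hf
    rw [prodA]
    by_cases hm : m = 0
    · subst hm
      simp
    · have hmpos : 0 < m := Nat.pos_of_ne_zero hm
      have h10 : PySem.Int.mod (m : Int) 10 = ((m % 10 : Nat) : Int) := by
        exact_mod_cast PySem.Int.mod_natCast m 10
      have hdiv : PySem.Int.floordiv (m : Int) 10 = ((m / 10 : Nat) : Int) := by
        exact_mod_cast PySem.Int.floordiv_natCast m 10
      rw [if_pos (by exact_mod_cast hm), h10, hdiv,
          ih (m / 10) _ (by omega), Nat.digits_def' (by norm_num) hmpos]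
      simp only [List.mem_cons, mul_eq_zero, Nat.cast_eq_zero]
      tauto

theorem natStrip_pos (m : Nat) (hm : 0 < m) : 0 < natStrip m := by
  induction m using Nat.strong_induction_on with
  | _ m ih =>
    rw [natStrip]
    split_ifs with h
    · exact ih (m / 10) (Nat.div_lt_self hm (by norm_num))
        (Nat.div_pos (Nat.le_of_dvd hm h.1) (by norm_num))
    · exact hm

theorem digits_natStrip (m : Nat) :
    Nat.digits 10 (natStrip m) = (Nat.digits 10 m).dropWhile (fun d => d == 0) := by
  induction m using Nat.strong_induction_on with
  | _ m ih =>
    rw [natStrip]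
    split_ifs with h
    · obtain ⟨hd, hm⟩ := h
      have hz : m % 10 = 0 := by omega
      rw [Nat.digits_def' (by norm_num) hm, hz, ih (m / 10) (Nat.div_lt_self hm (by norm_num))]
      simp
    · by_cases hm : m = 0
      · subst hm; simp
      · have hmpos : 0 < m := Nat.pos_of_ne_zero hm
        have hnd : ¬ 10 ∣ m := fun hd => h ⟨hd, hmpos⟩
        have hz : m % 10 ≠ 0 := by omega
        rw [Nat.digits_def' (by norm_num) hmpos, List.dropWhile_cons,
          if_neg (by simpa using hz)]

theorem toDigits_eq_digits (m : Nat) (hm : 0 < m) :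
    Nat.toDigits 10 m = ((Nat.digits 10 m).map Nat.digitChar).reverse := by
  induction m using Nat.strong_induction_on with
  | _ m ih =>
    by_cases h : m < 10
    · rw [Nat.toDigits_of_lt_base h, Nat.digits_def' (by norm_num) hm,
        Nat.mod_eq_of_lt h, Nat.div_eq_of_lt h]
      simp
    · rw [Nat.toDigits_of_base_le (by norm_num) (by omega),
        Nat.digits_def' (by norm_num) hm,
        ih (m / 10) (Nat.div_lt_self hm (by norm_num)) (Nat.div_pos (by omega) (by norm_num))]
      simp

theorem digitChar_beq_zero (d : Nat) (h : d < 10) :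
    (Nat.digitChar d == '0') = (d == 0) := by
  interval_cases d <;> decide

theorem dropWhile_digitChar (l : List Nat) (h : ∀ d ∈ l, d < 10) :
    l.dropWhile (fun d => Nat.digitChar d == '0') = l.dropWhile (fun d => d == 0) := by
  induction l with
  | nil => rfl
  | cons a l ih =>
    rw [List.dropWhile_cons, List.dropWhile_cons,
      digitChar_beq_zero a (h a (List.mem_cons_self))]
    split_ifs with ha
    · exact ih (fun d hd => h d (List.mem_cons_of_mem a hd))
    · rfl

theorem mem_map_digitChar (l : List Nat) (h : ∀ d ∈ l, d < 10) :
    ('0' ∈ l.map Nat.digitChar) ↔ 0 ∈ l := by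
  simp only [List.mem_map]
  constructor
  · rintro ⟨d, hd, he⟩
    have := digitChar_beq_zero d (h d hd)
    rw [he] at this
    simp at this
    rwa [this] at hd
  · intro h0
    exact ⟨0, h0, rfl⟩

-- ===== VERDICT (by name: the statement is the Claim_ definition above) =====
theorem singleton_isIn_iff (c : Char) (l : List Char) :
    PySem.Chars.isIn [c] l = true ↔ c ∈ l := by
  rw [PySem.Chars.isIn_iff_infix]
  exact List.singleton_infix_iff c l

theorem toChars_natCast (m : Nat) : PySem.Int.toChars (m : Int) = Nat.toDigits 10 m := by
  simp [PySem.Int.toChars]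

theorem solution_spec : Claim_equal_solution := by
  unfold Claim_equal_solution Spec_solution Pre_solution
  intro n _ hp
  lift n to Nat using le_of_lt hp with m
  have hm : 0 < m := by exact_mod_cast hp
  have hmem : ∀ l d, d ∈ Nat.digits 10 l → d < 10 :=
    fun l d hd => Nat.digits_lt_base (by norm_num) hd
  simp only [solution, solution_alt, Int.natAbs_natCast]
  simp only [stripA_eq (m + 1) m hm (by omega)]
  have hk : 0 < natStrip m := natStrip_pos m hm
  rw [toChars_natCast, toDigits_eq_digits m hm, List.reverse_reverse, Int.natAbs_natCast]
  have hdw : (List.map Nat.digitChar (Nat.digits 10 m)).dropWhile (fun c => c == '0')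
      = List.map Nat.digitChar (Nat.digits 10 (natStrip m)) := by
    rw [List.dropWhile_map]
    have : ((fun c => c == '0') ∘ Nat.digitChar) = fun d => Nat.digitChar d == '0' := rfl
    rw [this, dropWhile_digitChar _ (hmem m), digits_natStrip]
  rw [hdw]
  have hA : (prodA (natStrip m + 1) ((natStrip m : Nat) : Int) 1 = 0)
      ↔ 0 ∈ Nat.digits 10 (natStrip m) := by
    rw [prodA_zero_iff (natStrip m + 1) (natStrip m) 1 (by omega)]
    simp
  by_cases h0 : 0 ∈ Nat.digits 10 (natStrip m)
  · rw [if_pos (hA.mpr h0)]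
    have : '0' ∈ (List.map Nat.digitChar (Nat.digits 10 (natStrip m))).reverse := by
      rw [List.mem_reverse]
      exact (mem_map_digitChar _ (hmem (natStrip m))).mpr h0
    exact ((singleton_isIn_iff _ _).mpr this).symm
  · rw [if_neg (fun hc => h0 (hA.mp hc))]
    have : ¬ '0' ∈ (List.map Nat.digitChar (Nat.digits 10 (natStrip m))).reverse := by
      rw [List.mem_reverse]
      exact fun hc => h0 ((mem_map_digitChar _ (hmem (natStrip m))).mp hc)
    cases hb : PySem.Chars.isIn ['0'] ((List.map Nat.digitChar (Nat.digits 10 (natStrip m))).reverse)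
    · rfl
    · exact absurd ((singleton_isIn_iff _ _).mp hb) this
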